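-- pv_equiv track=rewrite | github.com/tommyfenyx/CalendarioTartessos | CT001.py | generar_calendario
-- ===== SOURCE A (Python) =====
-- DIAS_SEMANA = ["Amadei", "Soldei", "Tredei", "Vishnudei", "Liberdei", "Kidei"]
--
-- MESES = [
--     "Farvardín", "Ordibehesht", "Jordad", "Tir",
--     "Mordad", "Sahjrivar", "Mehr", "Aabán",
--     "Azar", "Dey", "Bahmæn", "Esfand"
-- ]
--
-- PRIMEROS_DIAS_CICLO = {
--     0: "Kidei",  # Corresponde al año 1408, 1416, etc. (año % 8 == 0)
--     1: "Liberdei",  # Corresponde al año 1401, 1409, etc. (año % 8 == 1)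
--     2: "Vishnudei",  # Corresponde al año 1402, 1410, etc. (año % 8 == 2)
--     3: "Tredei",  # Corresponde al año 1403, 1411, etc. (año % 8 == 3)
--     4: "Tredei",  # Corresponde al año 1404, 1412, etc. (año % 8 == 4)
--     5: "Soldei",  # Corresponde al año 1405, 1413, etc. (año % 8 == 5)
--     6: "Amadei",  # Corresponde al año 1406, 1414, etc. (año % 8 == 6)
--     7: "Kidei"  # Corresponde al año 1407, 1415, etc. (año % 8 == 7)
-- }
--
-- def es_bisiesto_khayyam(year):
--     # Calcular el índice dentro del ciclo de 2820 años, usando 457 como año de referencia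
--     indice_ciclo = (year - 457) % 2820
--
--     # Definición de los períodos dentro del ciclo de 2820 años
--     periodos = [
--         (128, 7),  # 21 períodos de 128 años con 7 años bisiestos cada uno
--         (29, 7),   # 1 período de 29 años con 7 años bisiestos
--         (33, 8),   # 3 períodos de 33 años con 8 años bisiestos cada uno
--         (132, 7),  # 1 período de 132 años con 7 años bisiestos
--         (33, 8),   # 2 períodos de 33 años con 8 años bisiestos cada uno
--         (37, 9)    # 1 período de 37 años con 9 años bisiestos
--     ]
--
--     # Recorrer los períodos para encontrar el año correcto
--     for periodo in periodos:
--         if indice_ciclo < periodo[0]: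
--             return (indice_ciclo > 1) and ((indice_ciclo - 1) % 4 == 0)
--         else:
--             indice_ciclo -= periodo[0]
--
--     return False
--
-- def obtener_primer_dia(year):
--     indice_ciclo = (year - 1401) % 8
--     if indice_ciclo == 7:
--         indice_ciclo = 0
--     else:
--         indice_ciclo += 1
--
--     primer_dia_actual = PRIMEROS_DIAS_CICLO[indice_ciclo]
--     return primer_dia_actual
--
-- def generar_calendario(year):
--     es_bisiesto_year = es_bisiesto_khayyam(year)
--
--     # Duración de los meses (en días)
--     DURACION_MESES = [31, 31, 31, 31, 31, 31, 30, 30, 30, 30, 30, 29]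
--
--     if es_bisiesto_year:
--         DURACION_MESES[-1] = 30  # Esfand tiene 30 días en años bisiestos
--     else:
--         DURACION_MESES[-1] = 29  # Esfand tiene 29 días en años no bisiestos
--
--     # Generar el calendario
--     calendario = {}
--     dia_actual = DIAS_SEMANA.index(obtener_primer_dia(year))
--
--     for mes_idx, mes in enumerate(MESES):
--         dias_mes = DURACION_MESES[mes_idx]
--         calendario[mes] = []
--
--         for dia in range(1, dias_mes + 1):
--             calendario[mes].append(DIAS_SEMANA[dia_actual])
--             dia_actual = (dia_actual + 1) % len(DIAS_SEMANA)
--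
--     return calendario
-- ===== SOURCE B (Python) =====
-- DIAS_SEMANA = ["Amadei", "Soldei", "Tredei", "Vishnudei", "Liberdei", "Kidei"]
--
-- MESES = [
--     "Farvardín", "Ordibehesht", "Jordad", "Tir",
--     "Mordad", "Sahjrivar", "Mehr", "Aabán",
--     "Azar", "Dey", "Bahmæn", "Esfand"
-- ]
--
-- PRIMEROS_DIAS_CICLO = {
--     0: "Kidei", 1: "Liberdei", 2: "Vishnudei", 3: "Tredei",
--     4: "Tredei", 5: "Soldei", 6: "Amadei", 7: "Kidei"
-- }
--
-- def es_bisiesto_khayyam(year):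
--     indice_ciclo = (year - 457) % 2820
--     periodos = [(128, 7), (29, 7), (33, 8), (132, 7), (33, 8), (37, 9)]
--     for periodo in periodos:
--         if indice_ciclo < periodo[0]:
--             return (indice_ciclo > 1) and ((indice_ciclo - 1) % 4 == 0)
--         else:
--             indice_ciclo -= periodo[0]
--     return False
--
-- def obtener_primer_dia(year):
--     indice_ciclo = (year - 1401) % 8
--     if indice_ciclo == 7:
--         indice_ciclo = 0
--     else:
--         indice_ciclo += 1
--     return PRIMEROS_DIAS_CICLO[indice_ciclo]
--
-- def generar_calendario(year):
--     # Each month is a truncated replication of a rotated week: no per-day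
--     # counting or modular indexing at all.  A month's list is the 6-day week,
--     # rotated to the month's starting weekday, tiled 6 times and cut to the
--     # month's length; the rotation advances by the month length mod 6.
--     duraciones = [31] * 6 + [30] * 5 + [30 if es_bisiesto_khayyam(year) else 29]
--     off = DIAS_SEMANA.index(obtener_primer_dia(year))
--     calendario = {}
--     for mes, n in zip(MESES, duraciones):
--         rot = DIAS_SEMANA[off:] + DIAS_SEMANA[:off]
--         calendario[mes] = (rot * 6)[:n]
--         off = (off + n) % 6
--     return calendario
-- ===== Notes on version B (the rewrite author's own statement) =====
-- stated objective: alternative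
-- what changed: B replaces A's day-by-day loop carrying a running weekday counter with a rotate-tile-truncate construction: each month's list is the six-day week rotated to the month's starting weekday, tiled and cut to the month length, the rotation advancing by the month length modulo the week length.
import Mathlib
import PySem

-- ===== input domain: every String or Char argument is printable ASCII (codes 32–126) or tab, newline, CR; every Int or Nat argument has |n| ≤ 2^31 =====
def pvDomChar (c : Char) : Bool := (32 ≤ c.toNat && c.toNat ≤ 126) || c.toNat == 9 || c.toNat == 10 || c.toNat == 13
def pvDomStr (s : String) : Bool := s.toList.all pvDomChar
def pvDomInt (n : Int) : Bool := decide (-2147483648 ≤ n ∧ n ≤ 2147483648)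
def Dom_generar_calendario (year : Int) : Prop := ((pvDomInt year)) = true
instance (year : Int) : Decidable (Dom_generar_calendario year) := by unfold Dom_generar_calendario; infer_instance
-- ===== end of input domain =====

-- B builds each month by rotate-tile-truncate of the 6-day week instead of A's day-by-day carried counter (alternative decomposition); helpers are shared verbatim by both Pythons.

-- ===== PORT A =====
-- module constants (shared by both Pythons verbatim)
def DIAS_SEMANA : List String := ["Amadei", "Soldei", "Tredei", "Vishnudei", "Liberdei", "Kidei"]

def MESES : List String :=
  ["Farvardín", "Ordibehesht", "Jordad", "Tir",
   "Mordad", "Sahjrivar", "Mehr", "Aabán",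
   "Azar", "Dey", "Bahmæn", "Esfand"]

def PRIMEROS_DIAS_CICLO : PySem.Dict Int String :=
  PySem.Dict.ofList [(0, "Kidei"), (1, "Liberdei"), (2, "Vishnudei"), (3, "Tredei"),
                     (4, "Tredei"), (5, "Soldei"), (6, "Amadei"), (7, "Kidei")]

-- the for-loop with early return over `periodos`, as structural recursion on the list
def esBisLoop (indice_ciclo : Int) : List (Int × Int) → Bool
  | [] => false
  | p :: rest =>
      if indice_ciclo < p.1 then
        (indice_ciclo > 1) && (PySem.Int.mod (indice_ciclo - 1) 4 == 0)
      else esBisLoop (indice_ciclo - p.1) rest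

def es_bisiesto_khayyam (year : Int) : Bool :=
  let indice_ciclo := PySem.Int.mod (year - 457) 2820
  let periodos : List (Int × Int) := [(128, 7), (29, 7), (33, 8), (132, 7), (33, 8), (37, 9)]
  esBisLoop indice_ciclo periodos

def obtener_primer_dia (year : Int) : String :=
  let indice_ciclo := PySem.Int.mod (year - 1401) 8
  let indice_ciclo := if indice_ciclo == 7 then 0 else indice_ciclo + 1
  -- dict[key]: the key is always present (indice_ciclo ∈ 0..7), so getD's default is never used
  PySem.Dict.getD PRIMEROS_DIAS_CICLO indice_ciclo ""

def generar_calendario (year : Int) : List (String × List String) :=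
  let es_bisiesto_year := es_bisiesto_khayyam year
  let DURACION_MESES : List Int := [31, 31, 31, 31, 31, 31, 30, 30, 30, 30, 30, 29]
  -- DURACION_MESES[-1] = …  (index -1 is position 11)
  let DURACION_MESES := if es_bisiesto_year then DURACION_MESES.set 11 30 else DURACION_MESES.set 11 29
  -- dia_actual = DIAS_SEMANA.index(...): always found, so the default 0 is never used
  let dia_actual : Int := ((PySem.List.index? DIAS_SEMANA (obtener_primer_dia year)).getD 0 : Nat)
  let init : PySem.Dict String (List String) × Int := (PySem.Dict.empty, dia_actual)
  let res := (PySem.List.enumerate MESES 0).foldl (fun (st : PySem.Dict String (List String) × Int) p =>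
      let (mes_idx, mes) := p
      let dias_mes := PySem.List.pyGetD DURACION_MESES mes_idx 0
      let st := (st.1.insert mes [], st.2)
      (PySem.List.pyRange 1 (dias_mes + 1) 1).foldl (fun (st : PySem.Dict String (List String) × Int) _ =>
          (st.1.modify mes [] (fun l => l ++ [PySem.List.pyGetD DIAS_SEMANA st.2 ""]),
           PySem.Int.mod (st.2 + 1) 6)) st) init
  res.1.items

-- ===== PORT B =====
def generar_calendario_alt (year : Int) : List (String × List String) :=
  let duraciones : List Int :=
    List.replicate 6 31 ++ List.replicate 5 30 ++ [if es_bisiesto_khayyam year then 30 else 29]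
  let off : Int := ((PySem.List.index? DIAS_SEMANA (obtener_primer_dia year)).getD 0 : Nat)
  let res := (MESES.zip duraciones).foldl
      (fun (st : PySem.Dict String (List String) × Int) p =>
        let (mes, n) := p
        -- rot = DIAS_SEMANA[off:] + DIAS_SEMANA[:off]
        let rot := PySem.List.slice DIAS_SEMANA (some st.2) none ++
                   PySem.List.slice DIAS_SEMANA none (some st.2)
        -- (rot * 6)[:n]
        (st.1.insert mes (PySem.List.slice ((List.replicate 6 rot).flatten) none (some n)),
         PySem.Int.mod (st.2 + n) 6))
      (PySem.Dict.empty, off)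
  res.1.items

-- ===== PRECONDITION & SPEC =====
def Spec_generar_calendario (year : Int) (out : List (String × List String)) : Prop := out = generar_calendario_alt year
instance (year : Int) (out : List (String × List String)) : Decidable (Spec_generar_calendario year out) := by unfold Spec_generar_calendario; infer_instance

-- ===== CLAIM (what is proved, stated in full; the proofs are below) =====
def Claim_equal_generar_calendario : Prop := ∀ (year : Int), Dom_generar_calendario year → Spec_generar_calendario year (generar_calendario year)

-- ===== LEMMAS AND PROOFS =====

-- The year enters only through the leap flag and the start index; factor both ports accordingly.
def bodyA (esb : Bool) (dia0 : Int) : List (String × List String) :=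
  let DURACION_MESES : List Int := [31, 31, 31, 31, 31, 31, 30, 30, 30, 30, 30, 29]
  let DURACION_MESES := if esb then DURACION_MESES.set 11 30 else DURACION_MESES.set 11 29
  let init : PySem.Dict String (List String) × Int := (PySem.Dict.empty, dia0)
  let res := (PySem.List.enumerate MESES 0).foldl (fun (st : PySem.Dict String (List String) × Int) p =>
      let (mes_idx, mes) := p
      let dias_mes := PySem.List.pyGetD DURACION_MESES mes_idx 0
      let st := (st.1.insert mes [], st.2)
      (PySem.List.pyRange 1 (dias_mes + 1) 1).foldl (fun (st : PySem.Dict String (List String) × Int) _ =>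
          (st.1.modify mes [] (fun l => l ++ [PySem.List.pyGetD DIAS_SEMANA st.2 ""]),
           PySem.Int.mod (st.2 + 1) 6)) st) init
  res.1.items

def bodyB (esb : Bool) (dia0 : Int) : List (String × List String) :=
  let duraciones : List Int := List.replicate 6 31 ++ List.replicate 5 30 ++ [if esb then 30 else 29]
  let res := (MESES.zip duraciones).foldl
      (fun (st : PySem.Dict String (List String) × Int) p =>
        let (mes, n) := p
        let rot := PySem.List.slice DIAS_SEMANA (some st.2) none ++
                   PySem.List.slice DIAS_SEMANA none (some st.2)
        (st.1.insert mes (PySem.List.slice ((List.replicate 6 rot).flatten) none (some n)),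
         PySem.Int.mod (st.2 + n) 6))
      (PySem.Dict.empty, dia0)
  res.1.items

lemma genA_eq (year : Int) :
    generar_calendario year =
      bodyA (es_bisiesto_khayyam year)
        (((PySem.List.index? DIAS_SEMANA (obtener_primer_dia year)).getD 0 : Nat)) := rfl

lemma genB_eq (year : Int) :
    generar_calendario_alt year =
      bodyB (es_bisiesto_khayyam year)
        (((PySem.List.index? DIAS_SEMANA (obtener_primer_dia year)).getD 0 : Nat)) := rfl

lemma startIdx_cases (year : Int) :
    ∃ s : Int, ((PySem.List.index? DIAS_SEMANA (obtener_primer_dia year)).getD 0 : Nat) = s ∧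
      (s = 0 ∨ s = 1 ∨ s = 2 ∨ s = 3 ∨ s = 4 ∨ s = 5) := by
  have h0 : 0 ≤ PySem.Int.mod (year - 1401) 8 := PySem.Int.mod_nonneg _ (by norm_num)
  have h8 : PySem.Int.mod (year - 1401) 8 < 8 := PySem.Int.mod_lt _ (by norm_num)
  set m := PySem.Int.mod (year - 1401) 8 with hm
  have : m = 0 ∨ m = 1 ∨ m = 2 ∨ m = 3 ∨ m = 4 ∨ m = 5 ∨ m = 6 ∨ m = 7 := by omega
  unfold obtener_primer_dia
  rw [← hm]
  rcases this with h | h | h | h | h | h | h | h <;> rw [h] <;>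
    exact ⟨_, rfl, by decide⟩

set_option maxHeartbeats 4000000 in
set_option maxRecDepth 100000 in
lemma body_eq (esb : Bool) (s : Int)
    (hs : s = 0 ∨ s = 1 ∨ s = 2 ∨ s = 3 ∨ s = 4 ∨ s = 5) :
    bodyA esb s = bodyB esb s := by
  rcases hs with h | h | h | h | h | h <;> subst h <;> cases esb <;> decide

-- ===== VERDICT (by name: the statement is the Claim_ definition above) =====
theorem generar_calendario_spec : Claim_equal_generar_calendario := by
  intro year _
  unfold Spec_generar_calendario
  rw [genA_eq, genB_eq]
  obtain ⟨s, hs, hcases⟩ := startIdx_cases year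
  rw [hs]
  exact body_eq _ _ hcases
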